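-- pv_equiv track=rewrite | github.com/jazzooi21/QuiverZLive | quiverzlive/calc_HS_C.py | monotone_tuples
-- ===== SOURCE A (Python) =====
-- from typing import Dict, Iterable, Tuple, Optional
--
-- def monotone_tuples(rank: int, B: int) -> Iterable[Tuple[int, ...]]:
--     """
--     Generate nonincreasing integer tuples (m1>=...>=mN) with each mi in [-B, B].
--     """
--     cur = [0] * rank
--     def rec(i: int, prev: int):
--         if i == rank:
--             yield tuple(cur); return
--         for v in range(-B, prev + 1):
--             cur[i] = v
--             yield from rec(i + 1, v)
--     yield from rec(0, B)
-- ===== SOURCE B (Python) =====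
-- def monotone_tuples(rank, B):
--     """Iterative level-by-level construction: start from the empty tuple and,
--     rank times, extend every tuple on the frontier by each value from -B up to
--     its last entry (up to B for the empty tuple). No recursion, no shared buffer."""
--     frontier = [()]
--     for _ in range(rank):
--         frontier = [t + (v,)
--                     for t in frontier
--                     for v in range(-B, (t[-1] if t else B) + 1)]
--     return frontier
-- ===== Notes on version B (the rewrite author's own statement) =====
-- stated objective: alternative
-- what changed: Replaces A's recursive backtracking generator over a shared mutable buffer with an iterative level-by-level construction: starting from the empty tuple, the frontier is extended rank times on the right by every admissible value, with no recursion and no in-place mutation; tuples are produced in the same lexicographic order.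
-- outside the precondition, e.g. on monotone_tuples(-1, -1): A returns [], B returns [()]
import Mathlib
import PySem

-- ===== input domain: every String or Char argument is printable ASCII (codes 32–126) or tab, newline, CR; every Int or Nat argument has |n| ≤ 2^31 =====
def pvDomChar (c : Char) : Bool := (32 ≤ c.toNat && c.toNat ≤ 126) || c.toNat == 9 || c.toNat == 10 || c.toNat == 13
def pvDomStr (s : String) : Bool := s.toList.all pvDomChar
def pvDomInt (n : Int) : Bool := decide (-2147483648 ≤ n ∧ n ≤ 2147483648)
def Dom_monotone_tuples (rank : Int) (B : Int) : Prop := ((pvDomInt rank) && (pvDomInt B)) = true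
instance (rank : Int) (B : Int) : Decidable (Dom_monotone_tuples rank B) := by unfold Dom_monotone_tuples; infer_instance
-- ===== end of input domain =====

-- B replaces A's recursive backtracking over a shared mutable buffer with an iterative level-by-level (frontier) construction; same values in the same order, similar cost.


-- ===== PORT A =====
-- A's rec(i, prev): the fuel is rank - i (Pre_ gives 0 ≤ rank, so the fuel counts i up to rank exactly);
-- cur is the shared buffer mutated by cur[i] = v, yield-from concatenation over the loop is flatMap.
def pyRecA (B : Int) (fuel : Nat) (cur : List Int) (i : Int) (prev : Int) : List (List Int) :=
  match fuel with
  | 0 => [cur]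
  | f + 1 =>
    (PySem.List.pyRange (-B) (prev + 1) 1).flatMap
      (fun v => pyRecA B f (cur.set i.toNat v) (i + 1) v)

def monotone_tuples (rank : Int) (B : Int) : List (List Int) :=
  pyRecA B rank.toNat (List.replicate rank.toNat 0) 0 B

-- ===== PORT B =====
-- one step of Source B's comprehension: extend every frontier tuple on the right by each admissible value
def extendB (B : Int) (frontier : List (List Int)) : List (List Int) :=
  frontier.flatMap (fun t =>
    (PySem.List.pyRange (-B) ((match t.getLast? with | some x => x | none => B) + 1) 1).map
      (fun v => t ++ [v]))

-- for _ in range(rank): frontier = [...]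
def monotone_tuples_alt (rank : Int) (B : Int) : List (List Int) :=
  (List.range rank.toNat).foldl (fun frontier _ => extendB B frontier) [[]]

-- ===== PRECONDITION & SPEC =====
-- Pre_ excludes negative rank, outside the natural domain: there A raises IndexError (cur[i] = v on the
-- empty buffer) whenever the value range is nonempty, and when B < 0 the empty range accidentally makes A
-- return []; B's frontier construction returns [()] there.
def Pre_monotone_tuples (rank : Int) (B : Int) : Prop := 0 ≤ rank
instance (rank : Int) (B : Int) : Decidable (Pre_monotone_tuples rank B) := by unfold Pre_monotone_tuples; infer_instance
def pvWitness_monotone_tuples : Int × Int := (2, 1)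

def Spec_monotone_tuples (rank : Int) (B : Int) (out : List (List Int)) : Prop := out = monotone_tuples_alt rank B
instance (rank : Int) (B : Int) (out : List (List Int)) : Decidable (Spec_monotone_tuples rank B out) := by unfold Spec_monotone_tuples; infer_instance

-- ===== CLAIM (what is proved, stated in full; the proofs are below) =====
def Claim_equal_monotone_tuples : Prop := ∀ (rank : Int) (B : Int), Dom_monotone_tuples rank B → Pre_monotone_tuples rank B → Spec_monotone_tuples rank B (monotone_tuples rank B)

-- ===== LEMMAS AND PROOFS =====

-- the common reference: nonincreasing suffixes of length n whose first entry is at most prev, in lex order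
def T (B : Int) : Nat → Int → List (List Int)
  | 0, _ => [[]]
  | n + 1, prev =>
    (PySem.List.pyRange (-B) (prev + 1) 1).flatMap (fun v => (T B n v).map (fun t => v :: t))

-- overwrite cur from position k with the elements of t (what A's cur[i] = v assignments amount to)
def setFrom (cur : List Int) (k : Nat) : List Int → List Int
  | [] => cur
  | v :: vs => setFrom (cur.set k v) (k + 1) vs

lemma flatMap_single {α β : Type} (f : α → β) (l : List α) :
    l.flatMap (fun v => [f v]) = l.map f := by
  induction l with
  | nil => rfl
  | cons x xs ih => simp [List.flatMap_cons, ih]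

lemma setFrom_eq_take_append (t : List Int) : ∀ (cur : List Int) (k : Nat),
    cur.length = k + t.length → setFrom cur k t = cur.take k ++ t := by
  induction t with
  | nil =>
    intro cur k h
    simp only [setFrom, List.append_nil]
    rw [List.take_of_length_le (by simp at h; omega)]
  | cons v vs ih =>
    intro cur k h
    have hk : k < cur.length := by simp at h; omega
    have h2 : (cur.set k v).length = (k + 1) + vs.length := by simp at h ⊢; omega
    rw [setFrom, ih _ _ h2, List.set_eq_take_append_cons_drop, if_pos hk]
    have hlen : (cur.take k).length = k := by simp; omega
    rw [List.take_append, hlen]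
    simp

-- A's pruned recursion writes exactly the suffixes T back into cur from position i
lemma pyRecA_eq_T (B : Int) (n : Nat) : ∀ (cur : List Int) (i prev : Int), 0 ≤ i →
    pyRecA B n cur i prev = (T B n prev).map (setFrom cur i.toNat) := by
  induction n with
  | zero => intro cur i prev _; simp [pyRecA, T, setFrom]
  | succ f ih =>
    intro cur i prev hi
    simp only [pyRecA, T]
    rw [List.map_flatMap]
    apply List.flatMap_congr
    intro v _
    rw [ih (cur.set i.toNat v) (i + 1) v (by omega), List.map_map]
    congr 1
    funext t
    simp only [Function.comp_apply, setFrom]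
    rw [show (i + 1).toNat = i.toNat + 1 by omega]

lemma length_mem_T {B : Int} {n : Nat} : ∀ {prev : Int}, ∀ t ∈ T B n prev, t.length = n := by
  induction n with
  | zero => intro prev t ht; simp [T] at ht; simp [ht]
  | succ f ih =>
    intro prev t ht
    simp only [T, List.mem_flatMap, List.mem_map] at ht
    obtain ⟨v, _, rest, hrest, rfl⟩ := ht
    simp [ih rest hrest]

-- extendB is a flatMap, so it distributes over flatMap
lemma extendB_flatMap {α : Type} (B : Int) (g : α → List (List Int)) (l : List α) :
    extendB B (l.flatMap g) = l.flatMap (fun a => extendB B (g a)) := by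
  unfold extendB; rw [List.flatMap_assoc]

-- extendB commutes past a fixed written prefix ending in x and extends T by one level
lemma extendB_map_T (B : Int) (n : Nat) : ∀ (x : Int) (p : List Int),
    extendB B ((T B n x).map (fun t => p ++ x :: t)) = (T B (n + 1) x).map (fun t => p ++ x :: t) := by
  induction n with
  | zero =>
    intro x p
    simp only [T, List.map_cons, List.map_nil, extendB, List.flatMap_cons, List.flatMap_nil,
      List.append_nil, List.getLast?_concat]
    rw [flatMap_single (fun v : Int => [v]), List.map_map]
    apply List.map_congr_left
    intro v _
    simp
  | succ f ih =>
    intro x p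
    have hcomp : ∀ v : Int, (fun t => p ++ x :: t) ∘ (fun t : List Int => v :: t)
        = fun t => (p ++ [x]) ++ v :: t := by
      intro v; funext t; simp
    conv_lhs => rw [T]
    conv_rhs => rw [T]
    rw [List.map_flatMap, List.map_flatMap, extendB_flatMap]
    apply List.flatMap_congr
    intro v _
    rw [List.map_map, List.map_map, hcomp v]
    exact ih v (p ++ [x])

lemma extendB_T (B : Int) (n : Nat) : extendB B (T B n B) = T B (n + 1) B := by
  cases n with
  | zero =>
    simp only [T, extendB, List.flatMap_cons, List.flatMap_nil, List.append_nil,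
      List.getLast?_nil, List.map_cons, List.map_nil]
    rw [flatMap_single (fun v => [v])]
    simp
  | succ f =>
    conv_lhs => rw [T]
    rw [extendB_flatMap]
    conv_rhs => rw [T]
    apply List.flatMap_congr
    intro v _
    have h := extendB_map_T B f v []
    simpa using h

lemma foldl_extendB (B : Int) (n : Nat) :
    (List.range n).foldl (fun frontier _ => extendB B frontier) [[]] = T B n B := by
  induction n with
  | zero => rfl
  | succ f ih => rw [List.range_succ, List.foldl_append, ih, List.foldl_cons, List.foldl_nil,
      extendB_T]

-- ===== VERDICT (by name: the statement is the Claim_ definition above) =====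
theorem monotone_tuples_spec : Claim_equal_monotone_tuples := by
  intro rank B _ hpre
  unfold Spec_monotone_tuples monotone_tuples monotone_tuples_alt
  rw [foldl_extendB, pyRecA_eq_T B rank.toNat (List.replicate rank.toNat 0) 0 B le_rfl]
  have hmap : ∀ t ∈ T B rank.toNat B, setFrom (List.replicate rank.toNat 0) (0 : Int).toNat t = t := by
    intro t ht
    have hlen := length_mem_T t ht
    rw [show ((0 : Int).toNat) = 0 from rfl,
        setFrom_eq_take_append t _ 0 (by simp [hlen])]
    simp
  rw [List.map_congr_left hmap]
  simp
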